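-- pv_equiv track=rewrite | github.com/YAN-LIU05/Tongji_DS_Courses | Python_Language_Programming/lessson2/lx2_2.py | table_merge
-- ===== SOURCE A (Python) =====
-- def table_merge(li1, li2):
--     for i in range(len(li1)):
--         li1[i][0]= str(li1[i][0])
--         student_id = str(li1[i][0])
--         for j in li2:
--             if str(j[0]) == str(student_id):
--                 li1[i] = j + li1[i][1:]
--                 break
--     return li1
-- ===== SOURCE B (Python) =====
-- def table_merge(li1, li2):
--     first = {}
--     for j in li2:
--         first.setdefault(str(j[0]), j)
--
--     def merged(row):
--         j = first.get(str(row[0]))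
--         return j + row[1:] if j is not None else row
--
--     li1[:] = [merged(row) for row in li1]
--     return li1
-- ===== Notes on version B (the rewrite author's own statement) =====
-- stated objective: alternative
-- what changed: B builds a dict of the first li2 row per id in one pass and then maps over li1 with dict lookups, instead of A's inner linear scan of li2 inside the loop over li1; the n*m double scan disappears.
-- outside the precondition, e.g. on table_merge([['1']], [['1', 'x'], []]): A returns [['1', 'x']], B raises IndexError
import Mathlib
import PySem

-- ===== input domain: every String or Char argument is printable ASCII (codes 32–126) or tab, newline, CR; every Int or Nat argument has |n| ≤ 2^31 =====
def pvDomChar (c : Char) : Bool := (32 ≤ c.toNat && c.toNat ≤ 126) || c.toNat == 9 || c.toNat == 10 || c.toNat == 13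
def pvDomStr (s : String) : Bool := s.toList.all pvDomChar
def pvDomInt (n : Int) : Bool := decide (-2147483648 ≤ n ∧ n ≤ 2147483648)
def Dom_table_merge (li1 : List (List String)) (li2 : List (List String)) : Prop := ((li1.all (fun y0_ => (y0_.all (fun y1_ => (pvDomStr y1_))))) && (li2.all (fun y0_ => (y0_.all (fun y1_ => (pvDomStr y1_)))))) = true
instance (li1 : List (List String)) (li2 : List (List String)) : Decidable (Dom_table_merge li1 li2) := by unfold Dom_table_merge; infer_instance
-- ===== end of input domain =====

-- B replaces A's inner scan of li2 by a dict of first occurrences built once, then a single map over li1;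
-- both Pythons mutate li1 in place, the equivalence proved here is about the returned value.


-- ===== PORT A =====
-- inner 'for j in li2: if str(j[0]) == str(student_id): … break' (str on a str is the identity;
-- rows are nonempty on Pre_, so j[0] is j.headD "")
def findFirstA (sid : String) : List (List String) → Option (List String)
  | [] => none
  | j :: rest => if j.headD "" == sid then some j else findFirstA sid rest

def table_merge (li1 : List (List String)) (li2 : List (List String)) : List (List String) :=
  (List.range li1.length).foldl (fun st i =>
    let row := st.getD i []
    -- li1[i][0] = str(li1[i][0]) : str of a string is that string, so the assignment rewrites the same row
    let st1 := st.set i row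
    match findFirstA (row.headD "") li2 with
    | some j => st1.set i (j ++ row.drop 1)
    | none => st1) li1

-- ===== PORT B =====
-- first = {}; for j in li2: first.setdefault(str(j[0]), j)
def firstById (li2 : List (List String)) : PySem.Dict String (List String) :=
  li2.foldl (fun d j => d.setdefault (j.headD "") j) PySem.Dict.empty

def table_merge_alt (li1 : List (List String)) (li2 : List (List String)) : List (List String) :=
  let first := firstById li2
  li1.map (fun row =>
    match first.get? (row.headD "") with
    | some j => j ++ row.drop 1
    | none => row)

-- ===== PRECONDITION & SPEC =====
-- Pre_ excludes empty rows in either table: Python A raises IndexError on j[0]/li1[i][0] there, and B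
-- naturally indexes the head of EVERY li2 row, so it also raises on an empty li2 row that A's break
-- skips (A returns there; one such excluded input is cited in claim.json).
def Pre_table_merge (li1 : List (List String)) (li2 : List (List String)) : Prop :=
  (∀ r ∈ li1, r ≠ []) ∧ (∀ r ∈ li2, r ≠ [])
instance (li1 : List (List String)) (li2 : List (List String)) : Decidable (Pre_table_merge li1 li2) := by unfold Pre_table_merge; infer_instance

def pvWitness_table_merge : List (List String) × List (List String) :=
  ([["1", "A"], ["2", "B"]], [["1", "x", "y"]])

def Spec_table_merge (li1 : List (List String)) (li2 : List (List String)) (out : List (List String)) : Prop := out = table_merge_alt li1 li2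
instance (li1 : List (List String)) (li2 : List (List String)) (out : List (List String)) : Decidable (Spec_table_merge li1 li2 out) := by unfold Spec_table_merge; infer_instance

-- ===== CLAIM (what is proved, stated in full; the proofs are below) =====
def Claim_equal_table_merge : Prop := ∀ (li1 : List (List String)) (li2 : List (List String)), Dom_table_merge li1 li2 → Pre_table_merge li1 li2 → Spec_table_merge li1 li2 (table_merge li1 li2)

-- ===== LEMMAS AND PROOFS =====

-- the pointwise function A applies to each row
def gA (li2 : List (List String)) (row : List String) : List String :=
  match findFirstA (row.headD "") li2 with
  | some j => j ++ row.drop 1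
  | none => row

-- an index-by-index rewrite loop is a map: folding `set i (g (getD i d0))` over range (length xs)
lemma foldl_set_range {α : Type} (g : α → α) (d0 : α) (xs : List α) (m : Nat) (hm : m ≤ xs.length) :
    (List.range m).foldl (fun st i => st.set i (g (st.getD i d0))) xs
      = (xs.take m).map g ++ xs.drop m := by
  induction m with
  | zero => simp
  | succ m ih =>
    have hm' : m < xs.length := by omega
    rw [List.range_succ, List.foldl_append, ih (Nat.le_of_lt hm')]
    have hlen : ((xs.take m).map g).length = m := by
      simp [Nat.min_eq_left (Nat.le_of_lt hm')]
    have hdrop : xs.drop m = xs[m] :: xs.drop (m + 1) := List.drop_eq_getElem_cons hm'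
    have hget : (((xs.take m).map g) ++ xs.drop m).getD m d0 = xs[m] := by
      rw [List.getD, List.getElem?_append_right (by omega), hlen, Nat.sub_self, hdrop]
      simp [List.getElem?_eq_getElem hm']
    simp only [List.foldl_cons, List.foldl_nil, hget]
    rw [List.set_append, hlen]
    rw [if_neg (lt_irrefl m), Nat.sub_self, hdrop, List.set_cons_zero]
    have htake : List.take (m + 1) (List.map g xs) = List.take m (List.map g xs) ++ [g xs[m]] := by
      rw [List.take_add_one, List.getElem?_map, List.getElem?_eq_getElem hm']
      rfl
    simp only [List.map_take, htake]
    simp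

-- A's step equals the pointwise rewrite step
lemma stepA_eq (li2 : List (List String)) (st : List (List String)) (i : Nat) :
    (let row := st.getD i []
     let st1 := st.set i row
     match findFirstA (row.headD "") li2 with
     | some j => st1.set i (j ++ row.drop 1)
     | none => st1)
    = st.set i (gA li2 (st.getD i [])) := by
  simp only [gA]
  cases findFirstA ((st.getD i []).headD "") li2 with
  | none => rfl
  | some j => simp only [List.set_set]

-- A computes the map of gA
lemma table_merge_eq_map (li1 li2 : List (List String)) :
    table_merge li1 li2 = li1.map (gA li2) := by
  unfold table_merge
  have : ((List.range li1.length).foldl (fun st i =>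
       let row := st.getD i []
       let st1 := st.set i row
       match findFirstA (row.headD "") li2 with
       | some j => st1.set i (j ++ row.drop 1)
       | none => st1) li1)
      = (List.range li1.length).foldl (fun st i => st.set i (gA li2 (st.getD i []))) li1 := by
    have hf : (fun (st : List (List String)) (i : Nat) =>
        let row := st.getD i []
        let st1 := st.set i row
        match findFirstA (row.headD "") li2 with
        | some j => st1.set i (j ++ row.drop 1)
        | none => st1)
      = (fun st i => st.set i (gA li2 (st.getD i []))) := by
      funext st i; exact stepA_eq li2 st i
    rw [hf]
  rw [this, foldl_set_range (gA li2) [] li1 li1.length le_rfl]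
  simp

-- the dict of first occurrences answers exactly what the inner scan finds
lemma get?_firstById_aux (sid : String) (li2 : List (List String))
    (d : PySem.Dict String (List String)) :
    (li2.foldl (fun d j => d.setdefault (j.headD "") j) d).get? sid
      = match d.get? sid with
        | some v => some v
        | none => findFirstA sid li2 := by
  induction li2 generalizing d with
  | nil => cases h : d.get? sid <;> simp [findFirstA, h]
  | cons j rest ih =>
    have hfa : findFirstA sid (j :: rest)
        = if (j.headD "" == sid) = true then some j else findFirstA sid rest := rfl
    simp only [List.foldl_cons, ih]
    by_cases hc : d.contains (j.headD "") = true
    · rw [PySem.Dict.setdefault_of_contains _ _ hc]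
      cases h : d.get? sid with
      | some v => rfl
      | none =>
        have hne : ¬ (j.headD "" == sid) = true := by
          intro hq
          have hs : j.headD "" = sid := beq_iff_eq.mp hq
          rw [PySem.Dict.contains_eq_isSome_get?, hs, h] at hc
          simp at hc
        simp only [hfa, if_neg hne]
    · rw [PySem.Dict.setdefault_of_not_contains _ _ (by simpa using hc),
        PySem.Dict.get?_insert]
      by_cases hq : (j.headD "" == sid) = true
      · have hsid : sid = j.headD "" := (beq_iff_eq.mp hq).symm
        have h0 : d.get? sid = none := by
          rw [PySem.Dict.contains_eq_isSome_get?] at hc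
          rw [hsid]
          cases h : d.get? (j.headD "") with
          | none => rfl
          | some v => rw [h] at hc; simp at hc
        simp only [if_pos hsid, h0, hfa, if_pos hq]
      · have hne : ¬ sid = j.headD "" := fun hh => hq (by simp [hh])
        rw [if_neg hne]
        cases h : d.get? sid with
        | some v => rfl
        | none => simp only [hfa, if_neg hq]

lemma get?_firstById (sid : String) (li2 : List (List String)) :
    (firstById li2).get? sid = findFirstA sid li2 := by
  unfold firstById
  rw [get?_firstById_aux]
  simp

-- ===== VERDICT (by name: the statement is the Claim_ definition above) =====
theorem table_merge_spec : Claim_equal_table_merge := by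
  intro li1 li2 _ _
  unfold Spec_table_merge table_merge_alt
  rw [table_merge_eq_map]
  apply List.map_congr_left
  intro row _
  simp only [gA, get?_firstById]
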